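-- pv_equiv track=rewrite | github.com/xidchen/mednlp | mednlp/kg/index_task/wy_data.py | get_hospital_source
-- ===== SOURCE A (Python) =====
-- def get_hospital_source(hospital_source_rule, hospital_ids):
--     """
--     获取医院合并后的source开放规则.
--     参数:
--     hospital_ids->需要合并的医院ID.
--     """
--     include_source = set()
--     exclude_source = set()
--     if not hospital_ids:
--         include_source.add('0')
--         return include_source, exclude_source
--     first_hospital = True
--     open_all = False
--     for hospital_id in hospital_ids:
--         hospital_rule = hospital_source_rule.get(hospital_id, {})
--         # 只要一个医院全部开放就全部开放
--         if not hospital_rule.get('include'):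
--             include_source = set(['0'])
--             open_all = True
--         if not open_all:
--             include_source.update(hospital_rule.get('include'))
--         if first_hospital:
--             exclude_source = hospital_rule.get('exclude', set())
--             first_hospital = False
--         # 所有医院都屏蔽才屏蔽
--         exclude_source = exclude_source & hospital_rule.get('exclude', set())
--     # 反向优先级高于正向
--     include_source = include_source - exclude_source
--     return include_source, exclude_source
-- ===== SOURCE B (Python) =====
-- def get_hospital_source(hospital_source_rule, hospital_ids):
--     """
--     获取医院合并后的source开放规则.
--     参数:
--     hospital_ids->需要合并的医院ID.
--     """
--     if not hospital_ids:
--         return {'0'}, set()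
--     # pass 1: open everything if any hospital has no (or an empty) include rule
--     open_all = any(not hospital_source_rule.get(h, {}).get('include')
--                    for h in hospital_ids)
--     # pass 2: the merged include set
--     if open_all:
--         include = {'0'}
--     else:
--         include = set()
--         for h in hospital_ids:
--             include |= hospital_source_rule.get(h, {}).get('include')
--     # pass 3: exclude only what every hospital excludes ('&' always builds a
--     # fresh set, so the result is never aliased to a rule dict's set)
--     exclude = hospital_source_rule.get(hospital_ids[0], {}).get('exclude', set())
--     for h in hospital_ids:
--         exclude = exclude & hospital_source_rule.get(h, {}).get('exclude', set())
--     return include - exclude, exclude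
-- ===== Notes on version B (the rewrite author's own statement) =====
-- stated objective: alternative
-- what changed: Replaces A's single interleaved loop carrying four pieces of state (include, exclude, first_hospital, open_all flags) by three independent passes: an any() test for open-all, a plain union loop for include, and an intersection loop over all hospitals for exclude.
import Mathlib
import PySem

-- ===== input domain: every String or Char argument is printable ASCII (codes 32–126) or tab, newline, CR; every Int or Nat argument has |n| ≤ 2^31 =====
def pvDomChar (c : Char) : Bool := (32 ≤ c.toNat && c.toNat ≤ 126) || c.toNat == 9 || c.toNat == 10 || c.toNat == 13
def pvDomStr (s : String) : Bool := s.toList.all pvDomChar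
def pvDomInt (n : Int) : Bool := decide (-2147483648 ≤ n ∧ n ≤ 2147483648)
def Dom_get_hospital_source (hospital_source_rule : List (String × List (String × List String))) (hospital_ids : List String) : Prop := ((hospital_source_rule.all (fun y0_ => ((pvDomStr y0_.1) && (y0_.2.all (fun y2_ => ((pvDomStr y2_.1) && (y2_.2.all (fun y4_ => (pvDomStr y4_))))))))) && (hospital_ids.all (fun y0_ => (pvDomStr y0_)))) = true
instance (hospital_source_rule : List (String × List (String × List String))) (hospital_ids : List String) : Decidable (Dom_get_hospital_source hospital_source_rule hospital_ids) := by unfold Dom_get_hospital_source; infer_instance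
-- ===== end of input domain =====

-- ===== PORT A =====
-- B reorganises A's single interleaved loop into three independent passes (same cost).
-- shared dict lookups: hospital_source_rule.get(h, {}).get('include'/'exclude', …)
def pvRuleOf (hospital_source_rule : List (String × List (String × List String))) (h : String) : List (String × List String) :=
  PySem.Dict.getD (PySem.Dict.mk hospital_source_rule) h []

-- hospital_rule.get('include') ; Python tests it for falsiness (None or empty set), modelled as = []
def pvIncOf (hospital_source_rule : List (String × List (String × List String))) (h : String) : List String :=
  PySem.Dict.getD (PySem.Dict.mk (pvRuleOf hospital_source_rule h)) "include" []

-- hospital_rule.get('exclude', set())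
def pvExcOf (hospital_source_rule : List (String × List (String × List String))) (h : String) : List String :=
  PySem.Dict.getD (PySem.Dict.mk (pvRuleOf hospital_source_rule h)) "exclude" []

-- the body of A's for-loop; state = (include_source, exclude_source, first_hospital, open_all)
def pvStepA (hospital_source_rule : List (String × List (String × List String)))
    (s : List String × List String × Bool × Bool) (hid : String) :
    List String × List String × Bool × Bool :=
  let incv := pvIncOf hospital_source_rule hid
  -- if not hospital_rule.get('include'): include_source = set(['0']); open_all = True
  let inc1 := if incv.isEmpty then PySem.Set.ofList ["0"] else s.1
  let opn1 := if incv.isEmpty then true else s.2.2.2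
  -- if not open_all: include_source.update(hospital_rule.get('include'))
  let inc2 := if opn1 then inc1 else PySem.Set.update inc1 incv
  -- if first_hospital: exclude_source = hospital_rule.get('exclude', set()); first_hospital = False
  let exc1 := if s.2.2.1 then pvExcOf hospital_source_rule hid else s.2.1
  let first1 := if s.2.2.1 then false else s.2.2.1
  -- exclude_source = exclude_source & hospital_rule.get('exclude', set())
  (inc2, PySem.Set.inter exc1 (pvExcOf hospital_source_rule hid), first1, opn1)

def get_hospital_source (hospital_source_rule : List (String × List (String × List String))) (hospital_ids : List String) : List String × List String :=
  if hospital_ids.isEmpty then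
    (PySem.Set.add PySem.Set.empty "0", PySem.Set.empty)
  else
    let s := hospital_ids.foldl (pvStepA hospital_source_rule)
      (PySem.Set.empty, PySem.Set.empty, true, false)
    (PySem.Set.diff s.1 s.2.1, s.2.1)

-- ===== PORT B =====
def get_hospital_source_alt (hospital_source_rule : List (String × List (String × List String))) (hospital_ids : List String) : List String × List String :=
  match hospital_ids with
  | [] => (PySem.Set.ofList ["0"], PySem.Set.empty)
  | h0 :: _ =>
    let openAll := hospital_ids.any (fun h => (pvIncOf hospital_source_rule h).isEmpty)
    let include_ :=
      if openAll then PySem.Set.ofList ["0"]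
      else hospital_ids.foldl
        (fun acc h => PySem.Set.update acc (pvIncOf hospital_source_rule h)) PySem.Set.empty
    let exclude_ := hospital_ids.foldl
      (fun acc h => PySem.Set.inter acc (pvExcOf hospital_source_rule h))
      (pvExcOf hospital_source_rule h0)
    (PySem.Set.diff include_ exclude_, exclude_)
-- ===== PRECONDITION & SPEC =====
def Spec_get_hospital_source (hospital_source_rule : List (String × List (String × List String))) (hospital_ids : List String) (out : List String × List String) : Prop := out = get_hospital_source_alt hospital_source_rule hospital_ids
instance (hospital_source_rule : List (String × List (String × List String))) (hospital_ids : List String) (out : List String × List String) : Decidable (Spec_get_hospital_source hospital_source_rule hospital_ids out) := by unfold Spec_get_hospital_source; infer_instance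

-- ===== CLAIM (what is proved, stated in full; the proofs are below) =====
def Claim_equal_get_hospital_source : Prop := ∀ (hospital_source_rule : List (String × List (String × List String))) (hospital_ids : List String), Dom_get_hospital_source hospital_source_rule hospital_ids → Spec_get_hospital_source hospital_source_rule hospital_ids (get_hospital_source hospital_source_rule hospital_ids)

-- ===== LEMMAS AND PROOFS =====

lemma pvFoldA_inv (hsr : List (String × List (String × List String))) (rest : List String) :
    ∀ (inc exc : List String) (opn : Bool), (opn = true → inc = PySem.Set.ofList ["0"]) →
    rest.foldl (pvStepA hsr) (inc, exc, false, opn) =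
      ( (if opn || rest.any (fun h => (pvIncOf hsr h).isEmpty)
          then PySem.Set.ofList ["0"]
          else rest.foldl (fun a h => PySem.Set.update a (pvIncOf hsr h)) inc),
        rest.foldl (fun a h => PySem.Set.inter a (pvExcOf hsr h)) exc,
        false,
        opn || rest.any (fun h => (pvIncOf hsr h).isEmpty) ) := by
  induction rest with
  | nil =>
    intro inc exc opn hopn
    cases opn with
    | false => simp
    | true => simp [hopn rfl]
  | cons h t ih =>
    intro inc exc opn hopn
    simp only [List.foldl_cons, List.any_cons, pvStepA]
    cases hinc : (pvIncOf hsr h).isEmpty with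
    | true =>
      simp only [reduceIte, Bool.false_eq_true, if_false]
      rw [ih _ _ _ (fun _ => rfl)]
      simp
    | false =>
      cases opn with
      | true =>
        simp only [reduceIte, Bool.false_eq_true, if_false]
        rw [ih _ _ _ hopn]
        simp
      | false =>
        simp only [Bool.false_eq_true, if_false]
        rw [ih _ _ _ (by simp)]
        simp

-- ===== VERDICT (by name: the statement is the Claim_ definition above) =====
theorem get_hospital_source_spec : Claim_equal_get_hospital_source := by
  intro hsr ids _
  unfold Spec_get_hospital_source
  cases ids with
  | nil => rfl
  | cons h0 rest =>
    show get_hospital_source hsr (h0 :: rest) = get_hospital_source_alt hsr (h0 :: rest)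
    unfold get_hospital_source get_hospital_source_alt
    simp only [List.isEmpty_cons, Bool.false_eq_true, if_false, List.foldl_cons, List.any_cons]
    by_cases hinc : (pvIncOf hsr h0).isEmpty
    · have hstep : pvStepA hsr (PySem.Set.empty, PySem.Set.empty, true, false) h0 =
        (PySem.Set.ofList ["0"],
         PySem.Set.inter (pvExcOf hsr h0) (pvExcOf hsr h0), false, true) := by
        simp [pvStepA, hinc]
      rw [hstep, pvFoldA_inv hsr rest _ _ _ (fun _ => rfl)]
      simp [hinc]
    · have hstep : pvStepA hsr (PySem.Set.empty, PySem.Set.empty, true, false) h0 =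
        (PySem.Set.update PySem.Set.empty (pvIncOf hsr h0),
         PySem.Set.inter (pvExcOf hsr h0) (pvExcOf hsr h0), false, false) := by
        simp [pvStepA, hinc]
      rw [hstep, pvFoldA_inv hsr rest _ _ _ (by simp)]
      simp [hinc]
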